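-- pv_equiv track=rewrite | github.com/bkoshik/Sunny | modules/fetch_weather.py | get_wind_color
-- ===== SOURCE A (Python) =====
-- from typing import NamedTuple, Optional
--
-- def get_wind_color(speed: int, units: str) -> Optional[str]:
--     if units == "metric":
--         thresholds = [(5, "36"), (15, "32"), (30, "38;5;226"), (50, "38;5;208")]
--     elif units == "imperial":
--         thresholds = [(3, "36"), (10, "32"), (20, "38;5;226"), (30, "38;5;208")]
--     else:
--         return None
--
--     for threshold, color in thresholds:
--         if speed <= threshold:
--             return f"\033[{color}m"
--     return "\033[31m"
-- ===== SOURCE B (Python) =====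
-- _TABLE = {
--     "metric": ([5, 15, 30, 50], ["36", "32", "38;5;226", "38;5;208"]),
--     "imperial": ([3, 10, 20, 30], ["36", "32", "38;5;226", "38;5;208"]),
-- }
--
-- def get_wind_color(speed, units):
--     entry = _TABLE.get(units)
--     if entry is None:
--         return None
--     bounds, colors = entry
--     # bisect_left by hand: index of first bound >= speed
--     lo, hi = 0, len(bounds)
--     while lo < hi:
--         mid = (lo + hi) // 2
--         if bounds[mid] < speed:
--             lo = mid + 1
--         else:
--             hi = mid
--     if lo < len(colors):
--         return "\033[" + colors[lo] + "m"
--     return "\033[31m"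
-- ===== Notes on version B (the rewrite author's own statement) =====
-- stated objective: alternative
-- what changed: Replaces the linear scan over (threshold, color) pairs with a table of parallel bound/color lists and a hand-written bisect_left binary search that returns the color at the first bound >= speed (red fallback past the last bound).
import Mathlib
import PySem

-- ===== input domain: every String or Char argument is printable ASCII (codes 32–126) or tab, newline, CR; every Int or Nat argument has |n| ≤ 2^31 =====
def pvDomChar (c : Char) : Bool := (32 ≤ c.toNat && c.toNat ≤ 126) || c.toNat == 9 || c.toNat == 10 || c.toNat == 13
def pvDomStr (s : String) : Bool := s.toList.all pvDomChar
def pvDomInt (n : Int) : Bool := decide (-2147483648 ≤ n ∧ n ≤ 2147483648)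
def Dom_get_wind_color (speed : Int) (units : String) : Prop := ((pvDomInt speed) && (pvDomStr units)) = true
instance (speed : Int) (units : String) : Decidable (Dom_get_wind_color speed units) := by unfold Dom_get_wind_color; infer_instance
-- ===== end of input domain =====

-- ===== PORT A =====
-- one honest line: B replaces A's linear threshold scan with a bisect_left binary search over parallel bound/color lists (alternative structure, same result)
def pvLoopA (speed : Int) : List (Int × String) → Option String
  | [] => some "\u001B[31m"
  | (t, c) :: rest => if speed ≤ t then some ("\u001B[" ++ c ++ "m") else pvLoopA speed rest

def get_wind_color (speed : Int) (units : String) : Option String :=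
  if units == "metric" then
    pvLoopA speed [(5, "36"), (15, "32"), (30, "38;5;226"), (50, "38;5;208")]
  else if units == "imperial" then
    pvLoopA speed [(3, "36"), (10, "32"), (20, "38;5;226"), (30, "38;5;208")]
  else none

-- ===== PORT B =====
def pvTable : PySem.Dict String (List Int × List String) :=
  PySem.Dict.ofList
    [("metric", ([5, 15, 30, 50], ["36", "32", "38;5;226", "38;5;208"])),
     ("imperial", ([3, 10, 20, 30], ["36", "32", "38;5;226", "38;5;208"]))]

-- the while-loop of Source B: bisect_left; bounds[mid] is always in range (0 ≤ lo ≤ mid < hi ≤ len), ported with getD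
def pvBisectLeft (bounds : List Int) (speed : Int) (lo hi : Nat) : Nat :=
  if lo < hi then
    let mid := (lo + hi) / 2
    if bounds.getD mid 0 < speed then pvBisectLeft bounds speed (mid + 1) hi
    else pvBisectLeft bounds speed lo mid
  else lo
termination_by hi - lo
decreasing_by all_goals omega

def get_wind_color_alt (speed : Int) (units : String) : Option String :=
  match PySem.Dict.get? pvTable units with
  | none => none
  | some (bounds, colors) =>
    let lo := pvBisectLeft bounds speed 0 bounds.length
    if lo < colors.length then some ("\u001B[" ++ colors.getD lo "" ++ "m")
    else some "\u001B[31m"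

-- ===== PRECONDITION & SPEC =====
def Spec_get_wind_color (speed : Int) (units : String) (out : Option String) : Prop := out = get_wind_color_alt speed units
instance (speed : Int) (units : String) (out : Option String) : Decidable (Spec_get_wind_color speed units out) := by unfold Spec_get_wind_color; infer_instance

-- ===== CLAIM (what is proved, stated in full; the proofs are below) =====
def Claim_equal_get_wind_color : Prop := ∀ (speed : Int) (units : String), Dom_get_wind_color speed units → Spec_get_wind_color speed units (get_wind_color speed units)

-- ===== LEMMAS AND PROOFS =====

-- evaluate B's binary search and branch for each unit to A's scan shape
theorem pvBisect_step (bounds : List Int) (speed : Int) (lo hi : Nat) (h : lo < hi) :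
    pvBisectLeft bounds speed lo hi =
      (if bounds.getD ((lo + hi) / 2) 0 < speed then pvBisectLeft bounds speed ((lo + hi) / 2 + 1) hi
       else pvBisectLeft bounds speed lo ((lo + hi) / 2)) := by
  rw [pvBisectLeft]; simp [h]

theorem pvBisect_done (bounds : List Int) (speed : Int) (lo : Nat) :
    pvBisectLeft bounds speed lo lo = lo := by
  rw [pvBisectLeft]; simp

theorem pvBL_eval (b0 b1 b2 b3 : Int) (speed : Int) :
    pvBisectLeft [b0, b1, b2, b3] speed 0 4 =
      (if b2 < speed then (if b3 < speed then 4 else 3)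
       else if b1 < speed then 2 else if b0 < speed then 1 else 0) := by
  rw [pvBisect_step _ _ _ _ (by norm_num)]
  have g2 : List.getD [b0, b1, b2, b3] ((0 + 4) / 2) 0 = b2 := rfl
  rw [g2]
  by_cases h2 : b2 < speed
  · rw [if_pos h2, if_pos h2, pvBisect_step _ _ _ _ (by norm_num)]
    have g3 : List.getD [b0, b1, b2, b3] ((3 + 4) / 2) 0 = b3 := rfl
    rw [g3]
    by_cases h3 : b3 < speed
    · rw [if_pos h3, if_pos h3, pvBisect_done]
    · rw [if_neg h3, if_neg h3, pvBisect_done]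
  · rw [if_neg h2, if_neg h2, pvBisect_step _ _ _ _ (by norm_num)]
    have g1 : List.getD [b0, b1, b2, b3] ((0 + 2) / 2) 0 = b1 := rfl
    rw [g1]
    by_cases h1 : b1 < speed
    · rw [if_pos h1, if_pos h1, pvBisect_done]
    · rw [if_neg h1, if_neg h1, pvBisect_step _ _ _ _ (by norm_num)]
      have g0 : List.getD [b0, b1, b2, b3] ((0 + 1) / 2) 0 = b0 := rfl
      rw [g0]
      by_cases h0 : b0 < speed
      · rw [if_pos h0, if_pos h0, pvBisect_done]
      · rw [if_neg h0, if_neg h0, pvBisect_done]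

theorem pvB_metric (speed : Int) :
    get_wind_color_alt speed "metric" =
      (if speed ≤ 5 then some "\u001B[36m"
       else if speed ≤ 15 then some "\u001B[32m"
       else if speed ≤ 30 then some "\u001B[38;5;226m"
       else if speed ≤ 50 then some "\u001B[38;5;208m"
       else some "\u001B[31m") := by
  show (if pvBisectLeft [5, 15, 30, 50] speed 0 4 < 4 then
          some ("\u001B[" ++ List.getD ["36", "32", "38;5;226", "38;5;208"] (pvBisectLeft [5, 15, 30, 50] speed 0 4) "" ++ "m")
        else some "\u001B[31m") = _
  rw [pvBL_eval]
  split_ifs <;> first | rfl | omega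

theorem pvB_imperial (speed : Int) :
    get_wind_color_alt speed "imperial" =
      (if speed ≤ 3 then some "\u001B[36m"
       else if speed ≤ 10 then some "\u001B[32m"
       else if speed ≤ 20 then some "\u001B[38;5;226m"
       else if speed ≤ 30 then some "\u001B[38;5;208m"
       else some "\u001B[31m") := by
  show (if pvBisectLeft [3, 10, 20, 30] speed 0 4 < 4 then
          some ("\u001B[" ++ List.getD ["36", "32", "38;5;226", "38;5;208"] (pvBisectLeft [3, 10, 20, 30] speed 0 4) "" ++ "m")
        else some "\u001B[31m") = _
  rw [pvBL_eval]
  split_ifs <;> first | rfl | omega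

-- ===== VERDICT (by name: the statement is the Claim_ definition above) =====
theorem get_wind_color_spec : Claim_equal_get_wind_color := by
  intro speed units _
  unfold Spec_get_wind_color
  by_cases hm : units = "metric"
  · subst hm
    rw [pvB_metric]
    show pvLoopA speed [(5, "36"), (15, "32"), (30, "38;5;226"), (50, "38;5;208")] = _
    simp only [pvLoopA]
    split_ifs <;> rfl
  · by_cases hi : units = "imperial"
    · subst hi
      rw [pvB_imperial]
      show pvLoopA speed [(3, "36"), (10, "32"), (20, "38;5;226"), (30, "38;5;208")] = _
      simp only [pvLoopA]
      split_ifs <;> rfl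
    · have h1 : (units == "metric") = false := by simp [hm]
      have h2 : (units == "imperial") = false := by simp [hi]
      have h3 : ((("metric" : String)) == units) = false := by
        simp; exact fun h => hm h.symm
      have h4 : ((("imperial" : String)) == units) = false := by
        simp; exact fun h => hi h.symm
      have hitems : pvTable.items =
          [("metric", ([5, 15, 30, 50], ["36", "32", "38;5;226", "38;5;208"])),
           ("imperial", ([3, 10, 20, 30], ["36", "32", "38;5;226", "38;5;208"]))] := by decide
      simp [get_wind_color, get_wind_color_alt, PySem.Dict.get?, hitems,
            List.find?, h1, h2, h3, h4]
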